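-- pv_equiv track=rewrite | github.com/Dzaleka-Connect/Dzaleka-Metadata-Standard | dms/diff.py | diff_records
-- ===== SOURCE A (Python) =====
-- def diff_records(record_a: dict, record_b: dict) -> list[dict]:
--     """Compare two DMS records field by field.
--
--     Args:
--         record_a: First record dict (the "before" state).
--         record_b: Second record dict (the "after" state).
--
--     Returns:
--         List of diffs, each with keys: field, status, old, new.
--         Status is one of: 'added', 'removed', 'changed', 'unchanged'.
--     """
--     all_keys = sorted(set(list(record_a.keys()) + list(record_b.keys())))
--     diffs = []
--
--     for key in all_keys:
--         in_a = key in record_a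
--         in_b = key in record_b
--
--         if in_a and not in_b:
--             diffs.append({
--                 "field": key,
--                 "status": "removed",
--                 "old": record_a[key],
--                 "new": None,
--             })
--         elif not in_a and in_b:
--             diffs.append({
--                 "field": key,
--                 "status": "added",
--                 "old": None,
--                 "new": record_b[key],
--             })
--         elif record_a[key] != record_b[key]:
--             diffs.append({
--                 "field": key,
--                 "status": "changed",
--                 "old": record_a[key],
--                 "new": record_b[key],
--             })
--         else:
--             diffs.append({
--                 "field": key,
--                 "status": "unchanged",
--                 "old": record_a[key],
--                 "new": record_b[key],
--             })
--
--     return diffs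
-- ===== SOURCE B (Python) =====
-- def diff_records(record_a: dict, record_b: dict) -> list[dict]:
--     removed = [
--         {"field": k, "status": "removed", "old": record_a[k], "new": None}
--         for k in record_a if k not in record_b
--     ]
--     added = [
--         {"field": k, "status": "added", "old": None, "new": record_b[k]}
--         for k in record_b if k not in record_a
--     ]
--     common = [
--         {
--             "field": k,
--             "status": "changed" if record_a[k] != record_b[k] else "unchanged",
--             "old": record_a[k],
--             "new": record_b[k],
--         }
--         for k in record_a if k in record_b
--     ]
--     return sorted(removed + added + common, key=lambda d: d["field"])
-- ===== Notes on version B (the rewrite author's own statement) =====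
-- stated objective: alternative
-- what changed: Replaces A's single sorted-union loop with in_a/in_b branching by three set-partitioned comprehension passes (removed / added / common) concatenated and finally sorted by the 'field' key.
import Mathlib
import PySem

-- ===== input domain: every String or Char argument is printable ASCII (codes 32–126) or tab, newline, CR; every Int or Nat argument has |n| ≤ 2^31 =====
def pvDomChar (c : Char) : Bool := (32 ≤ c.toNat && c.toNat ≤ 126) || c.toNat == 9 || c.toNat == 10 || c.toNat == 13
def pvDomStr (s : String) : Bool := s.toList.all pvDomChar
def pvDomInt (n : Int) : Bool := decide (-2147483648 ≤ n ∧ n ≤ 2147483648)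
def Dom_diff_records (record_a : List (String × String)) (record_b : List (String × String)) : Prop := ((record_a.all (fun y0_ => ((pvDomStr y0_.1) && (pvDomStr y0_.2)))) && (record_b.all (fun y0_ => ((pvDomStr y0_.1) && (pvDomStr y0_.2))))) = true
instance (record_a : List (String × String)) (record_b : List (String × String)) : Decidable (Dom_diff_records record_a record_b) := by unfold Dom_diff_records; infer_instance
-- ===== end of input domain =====

-- B replaces A's single sorted-union loop by three set-partitioned passes plus a final sort by 'field' (alternative decomposition, same cost).

-- ===== PORT A =====
-- literal port of A: sorted union of the key sets, one loop with in_a/in_b branching.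
def diff_records (record_a : List (String × String)) (record_b : List (String × String)) : List (List (String × Option String)) :=
  let da := PySem.Dict.ofList record_a
  let db := PySem.Dict.ofList record_b
  let all_keys := PySem.List.sorted (PySem.Set.ofList (da.keys ++ db.keys)) (fun k => k) false
  all_keys.foldl (fun diffs key =>
    let in_a := da.contains key
    let in_b := db.contains key
    if in_a && !in_b then
      diffs ++ [[("field", some key), ("status", some "removed"), ("old", da.get? key), ("new", none)]]
    else if !in_a && in_b then
      diffs ++ [[("field", some key), ("status", some "added"), ("old", none), ("new", db.get? key)]]
    else if da.get? key ≠ db.get? key then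
      diffs ++ [[("field", some key), ("status", some "changed"), ("old", da.get? key), ("new", db.get? key)]]
    else
      diffs ++ [[("field", some key), ("status", some "unchanged"), ("old", da.get? key), ("new", db.get? key)]]) []

-- ===== PORT B =====
-- literal port of Source B: three comprehensions over the partitioned key sets, then sorted by the 'field' entry
-- (d["field"] is ported as the total getD form: every diff dict built here carries a "field" entry).
def diff_records_alt (record_a : List (String × String)) (record_b : List (String × String)) : List (List (String × Option String)) :=
  PySem.List.sorted
    (((PySem.Dict.ofList record_a).keys.filter (fun k => !(PySem.Dict.ofList record_b).contains k)).map (fun k =>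
        [("field", some k), ("status", some "removed"), ("old", (PySem.Dict.ofList record_a).get? k), ("new", none)])
      ++ ((PySem.Dict.ofList record_b).keys.filter (fun k => !(PySem.Dict.ofList record_a).contains k)).map (fun k =>
        [("field", some k), ("status", some "added"), ("old", none), ("new", (PySem.Dict.ofList record_b).get? k)])
      ++ ((PySem.Dict.ofList record_a).keys.filter (fun k => (PySem.Dict.ofList record_b).contains k)).map (fun k =>
        [("field", some k),
         ("status", if (PySem.Dict.ofList record_a).get? k ≠ (PySem.Dict.ofList record_b).get? k then some "changed" else some "unchanged"),
         ("old", (PySem.Dict.ofList record_a).get? k), ("new", (PySem.Dict.ofList record_b).get? k)]))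
    (fun d => ((PySem.Dict.mk d).getD "field" none).getD "") false

-- ===== PRECONDITION & SPEC =====
def Spec_diff_records (record_a : List (String × String)) (record_b : List (String × String)) (out : List (List (String × Option String))) : Prop := out = diff_records_alt record_a record_b
instance (record_a : List (String × String)) (record_b : List (String × String)) (out : List (List (String × Option String))) : Decidable (Spec_diff_records record_a record_b out) := by unfold Spec_diff_records; infer_instance

-- ===== CLAIM (what is proved, stated in full; the proofs are below) =====
def Claim_equal_diff_records : Prop := ∀ (record_a : List (String × String)) (record_b : List (String × String)), Dom_diff_records record_a record_b → Spec_diff_records record_a record_b (diff_records record_a record_b)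

-- ===== LEMMAS AND PROOFS =====

-- the diff dict both programs build for a key (proof-side characterisation)
def mkDiff (da db : PySem.Dict String String) (key : String) : List (String × Option String) :=
  if da.contains key && !db.contains key then
    [("field", some key), ("status", some "removed"), ("old", da.get? key), ("new", none)]
  else if !da.contains key && db.contains key then
    [("field", some key), ("status", some "added"), ("old", none), ("new", db.get? key)]
  else if da.get? key ≠ db.get? key then
    [("field", some key), ("status", some "changed"), ("old", da.get? key), ("new", db.get? key)]
  else
    [("field", some key), ("status", some "unchanged"), ("old", da.get? key), ("new", db.get? key)]

def keyOf (d : List (String × Option String)) : String :=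
  ((PySem.Dict.mk d).getD "field" none).getD ""

theorem keyOf_mkDiff (da db : PySem.Dict String String) (k : String) : keyOf (mkDiff da db k) = k := by
  unfold keyOf mkDiff
  split_ifs <;> simp [PySem.Dict.getD_eq_get?_getD, PySem.Dict.get?_mk_cons]

theorem foldl_mkDiff (da db : PySem.Dict String String) (keys : List String) :
    List.foldl (fun diffs key =>
      if da.contains key && !db.contains key then
        diffs ++ [[("field", some key), ("status", some "removed"), ("old", da.get? key), ("new", none)]]
      else if !da.contains key && db.contains key then
        diffs ++ [[("field", some key), ("status", some "added"), ("old", none), ("new", db.get? key)]]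
      else if da.get? key ≠ db.get? key then
        diffs ++ [[("field", some key), ("status", some "changed"), ("old", da.get? key), ("new", db.get? key)]]
      else
        diffs ++ [[("field", some key), ("status", some "unchanged"), ("old", da.get? key), ("new", db.get? key)]])
      [] keys = keys.map (mkDiff da db) := by
  rw [show (fun (diffs : List (List (String × Option String))) (key : String) =>
      if da.contains key && !db.contains key then
        diffs ++ [[("field", some key), ("status", some "removed"), ("old", da.get? key), ("new", none)]]
      else if !da.contains key && db.contains key then
        diffs ++ [[("field", some key), ("status", some "added"), ("old", none), ("new", db.get? key)]]
      else if da.get? key ≠ db.get? key then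
        diffs ++ [[("field", some key), ("status", some "changed"), ("old", da.get? key), ("new", db.get? key)]]
      else
        diffs ++ [[("field", some key), ("status", some "unchanged"), ("old", da.get? key), ("new", db.get? key)]])
      = fun diffs key => diffs ++ [mkDiff da db key] from by
        funext diffs key
        unfold mkDiff
        split_ifs <;> rfl]
  simpa using PySem.List.foldl_append_singleton_eq_map (mkDiff da db) keys []

theorem diff_records_eq_map (record_a record_b : List (String × String)) :
    diff_records record_a record_b =
      (PySem.List.sorted
        (PySem.Set.ofList ((PySem.Dict.ofList record_a).keys ++ (PySem.Dict.ofList record_b).keys))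
        (fun k => k) false).map (mkDiff (PySem.Dict.ofList record_a) (PySem.Dict.ofList record_b)) := by
  exact foldl_mkDiff _ _ _

theorem alt_eq_sorted_map (record_a record_b : List (String × String)) :
    diff_records_alt record_a record_b =
      PySem.List.sorted
        (((PySem.Dict.ofList record_a).keys.filter (fun k => !(PySem.Dict.ofList record_b).contains k)
          ++ (PySem.Dict.ofList record_b).keys.filter (fun k => !(PySem.Dict.ofList record_a).contains k)
          ++ (PySem.Dict.ofList record_a).keys.filter (fun k => (PySem.Dict.ofList record_b).contains k)).map
            (mkDiff (PySem.Dict.ofList record_a) (PySem.Dict.ofList record_b)))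
        keyOf false := by
  unfold diff_records_alt keyOf
  rw [List.map_append, List.map_append]
  congr 1
  congr 1
  congr 1
  · refine (List.map_congr_left ?_).symm
    intro k hk
    obtain ⟨hka, hkb⟩ := List.mem_filter.mp hk
    have ha : (PySem.Dict.ofList record_a).contains k = true :=
      (PySem.Dict.contains_iff_mem_keys _ _).mpr hka
    have hb : (PySem.Dict.ofList record_b).contains k = false := by
      simpa using hkb
    simp [mkDiff, ha, hb]
  · refine (List.map_congr_left ?_).symm
    intro k hk
    obtain ⟨hkb, hka⟩ := List.mem_filter.mp hk
    have hb : (PySem.Dict.ofList record_b).contains k = true :=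
      (PySem.Dict.contains_iff_mem_keys _ _).mpr hkb
    have ha : (PySem.Dict.ofList record_a).contains k = false := by
      simpa using hka
    simp [mkDiff, ha, hb]
  · refine (List.map_congr_left ?_).symm
    intro k hk
    obtain ⟨hka, hkb⟩ := List.mem_filter.mp hk
    have ha : (PySem.Dict.ofList record_a).contains k = true :=
      (PySem.Dict.contains_iff_mem_keys _ _).mpr hka
    have hb : (PySem.Dict.ofList record_b).contains k = true := by
      simpa using hkb
    by_cases hne : (PySem.Dict.ofList record_a).get? k = (PySem.Dict.ofList record_b).get? k <;>
      simp [mkDiff, ha, hb, hne]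

theorem keys_perm (record_a record_b : List (String × String)) :
    (PySem.Set.ofList ((PySem.Dict.ofList record_a).keys ++ (PySem.Dict.ofList record_b).keys)).Perm
      ((PySem.Dict.ofList record_a).keys.filter (fun k => !(PySem.Dict.ofList record_b).contains k)
        ++ (PySem.Dict.ofList record_b).keys.filter (fun k => !(PySem.Dict.ofList record_a).contains k)
        ++ (PySem.Dict.ofList record_a).keys.filter (fun k => (PySem.Dict.ofList record_b).contains k)) := by
  have hna : ((PySem.Dict.ofList record_a).keys).Nodup := PySem.Dict.nodup_keys_ofList _
  have hnb : ((PySem.Dict.ofList record_b).keys).Nodup := PySem.Dict.nodup_keys_ofList _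
  apply (List.perm_ext_iff_of_nodup (PySem.Set.nodup_ofList _) ?_).mpr
  · intro x
    by_cases hA : x ∈ (PySem.Dict.ofList record_a).keys <;>
      by_cases hB : x ∈ (PySem.Dict.ofList record_b).keys <;>
      simp [PySem.Set.mem_ofList, List.mem_filter, PySem.Dict.contains_iff_mem_keys,
        Bool.eq_false_iff, hA, hB]
  · refine List.nodup_append.mpr ⟨List.nodup_append.mpr ⟨hna.filter _, hnb.filter _, ?_⟩,
      hna.filter _, ?_⟩
    · intro a ha b hb
      rintro rfl
      obtain ⟨_, hcb⟩ := List.mem_filter.mp ha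
      obtain ⟨hbb, _⟩ := List.mem_filter.mp hb
      exact absurd ((PySem.Dict.contains_iff_mem_keys _ _).mpr hbb) (by simpa using hcb)
    · intro a ha b hb
      rintro rfl
      obtain ⟨hba, hcb'⟩ := List.mem_filter.mp hb
      rcases List.mem_append.mp ha with ha | ha
      · obtain ⟨_, hcb⟩ := List.mem_filter.mp ha
        simp_all
      · obtain ⟨_, hca⟩ := List.mem_filter.mp ha
        exact absurd ((PySem.Dict.contains_iff_mem_keys _ _).mpr hba) (by simpa using hca)

theorem diff_records_spec' (record_a record_b : List (String × String)) :
    diff_records record_a record_b = diff_records_alt record_a record_b := by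
  rw [alt_eq_sorted_map, diff_records_eq_map]
  refine Eq.symm (PySem.List.sorted_eq_of_perm_of_pairwise_lt _ _ _ ?_ ?_)
  · exact (((PySem.List.sorted_perm _ _ _).trans (keys_perm record_a record_b)).map _)
  · rw [List.pairwise_map]
    refine (PySem.List.sorted_ofList_pairwise_lt _).imp ?_
    intro a b h
    simpa [keyOf_mkDiff] using h

-- ===== VERDICT (by name: the statement is the Claim_ definition above) =====
theorem diff_records_spec : Claim_equal_diff_records := by
  intro record_a record_b _
  unfold Spec_diff_records
  exact diff_records_spec' record_a record_b
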